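-- pv_equiv track=rewrite | github.com/martincuestas/Algo-I-Talleres | ej_parciales.py | elem_en_posiciones_pares
-- ===== SOURCE A (Python) =====
-- def alguno_posicion_par(l: list[int], elem: int) -> bool:
--     for indice in range (len(l)):
--         if l[indice] == elem:
--             if indice%2 == 0:
--                 return True
--     return False
--
-- def elem_en_posiciones_pares(m: list[list[int]], elem: int) -> list[bool]:
--     list_bool: list[bool] = []
--     for fila in m:
--         if alguno_posicion_par(fila, elem):
--             list_bool.append(True)
--         else:
--             list_bool.append(False)
--     return list_bool
-- ===== SOURCE B (Python) =====
-- def elem_en_posiciones_pares(m: list[list[int]], elem: int) -> list[bool]: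
--     def halla(f: list[int]) -> bool:
--         # scan the even positions directly: look at the head, then drop two
--         while f:
--             if f[0] == elem:
--                 return True
--             f = f[2:]
--         return False
--     return [halla(fila) for fila in m]
-- ===== Notes on version B (the rewrite author's own statement) =====
-- stated objective: alternative
-- what changed: Replaces the index loop with its inline parity test by a head-then-drop-two scan of each row (no indices at all), and the append-loop over rows by a list comprehension.
import Mathlib
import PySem

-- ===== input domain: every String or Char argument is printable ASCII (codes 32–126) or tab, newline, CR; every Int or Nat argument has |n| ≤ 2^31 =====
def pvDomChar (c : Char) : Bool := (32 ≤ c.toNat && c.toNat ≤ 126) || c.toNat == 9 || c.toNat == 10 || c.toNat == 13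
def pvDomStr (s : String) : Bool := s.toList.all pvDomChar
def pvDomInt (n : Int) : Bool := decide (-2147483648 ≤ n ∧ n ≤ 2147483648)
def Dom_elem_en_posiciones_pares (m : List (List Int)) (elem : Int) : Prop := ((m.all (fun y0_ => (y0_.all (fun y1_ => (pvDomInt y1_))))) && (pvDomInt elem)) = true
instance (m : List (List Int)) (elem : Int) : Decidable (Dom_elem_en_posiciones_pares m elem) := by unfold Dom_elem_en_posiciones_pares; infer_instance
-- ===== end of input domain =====

-- B drops the index loop with its inline parity test: each row is scanned head-then-drop-two (no indices), one bool per row via map. Objective: alternative (not faster).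


-- ===== PORT A =====
-- the 'for indice in range(len(l))' loop of alguno_posicion_par, step for step
def algunoGo (l : List Int) (elem : Int) : List Int → Bool
  | [] => false
  | i :: rest =>
    match PySem.List.pyGet? l i with
    | some v =>
      if v == elem then
        if PySem.Int.mod i 2 == 0 then true else algunoGo l elem rest
      else algunoGo l elem rest
    | none => algunoGo l elem rest

def alguno_posicion_par (l : List Int) (elem : Int) : Bool :=
  algunoGo l elem (PySem.List.pyRange 0 (l.length : Int) 1)

def elem_en_posiciones_pares (m : List (List Int)) (elem : Int) : List Bool :=
  m.foldl (fun acc fila =>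
    if alguno_posicion_par fila elem then acc ++ [true] else acc ++ [false]) []

-- ===== PORT B =====
-- Source B's halla: while f: if f[0] == elem: return True; f = f[2:]
def halla (elem : Int) : List Int → Bool
  | [] => false
  | a :: t => if a == elem then true else halla elem (t.drop 1)
  termination_by l => l.length
  decreasing_by simp

def elem_en_posiciones_pares_alt (m : List (List Int)) (elem : Int) : List Bool :=
  m.map (fun fila => halla elem fila)

-- ===== PRECONDITION & SPEC =====
def Spec_elem_en_posiciones_pares (m : List (List Int)) (elem : Int) (out : List Bool) : Prop := out = elem_en_posiciones_pares_alt m elem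
instance (m : List (List Int)) (elem : Int) (out : List Bool) : Decidable (Spec_elem_en_posiciones_pares m elem out) := by unfold Spec_elem_en_posiciones_pares; infer_instance

-- ===== CLAIM (what is proved, stated in full; the proofs are below) =====
def Claim_equal_elem_en_posiciones_pares : Prop := ∀ (m : List (List Int)) (elem : Int), Dom_elem_en_posiciones_pares m elem → Spec_elem_en_posiciones_pares m elem (elem_en_posiciones_pares m elem)

-- ===== LEMMAS AND PROOFS =====

theorem halla_nil (elem : Int) : halla elem [] = false := by
  unfold halla; rfl

theorem halla_cons (elem a : Int) (t : List Int) :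
    halla elem (a :: t) = if a == elem then true else halla elem (t.drop 1) := by
  rw [halla]

theorem fmod_two_natCast (s : Nat) : (↑s : Int).fmod 2 = ((s % 2 : Nat) : Int) := by
  rw [Int.fmod_eq_emod]; omega

-- A's index scan from position s equals B's head-then-drop-two scan of the
-- corresponding suffix (shifted by one when s is odd).
theorem algunoGo_eq (l : List Int) (elem : Int) (s : Nat) :
    algunoGo l elem (PySem.List.pyRange (s : Int) (l.length : Int) 1) =
      (if s % 2 = 0 then halla elem (l.drop s) else halla elem (l.drop (s + 1))) := by
  by_cases hs : s < l.length
  case neg =>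
    rw [PySem.List.pyRange_one_eq_nil (by omega)]
    rw [List.drop_eq_nil_of_le (by omega), List.drop_eq_nil_of_le (by omega)]
    simp [algunoGo, halla_nil]
  case pos =>
    rw [PySem.List.pyRange_one_cons (by omega)]
    have hget : PySem.List.pyGet? l (s : Int) = some l[s] := by
      simp [PySem.List.pyGet?_natCast, List.getElem?_eq_getElem hs]
    have hdrop : l.drop s = l[s] :: l.drop (s + 1) := (List.getElem_cons_drop hs).symm
    have hcast : ((s : Int) + 1) = ((s + 1 : Nat) : Int) := by push_cast; ring
    have ih := algunoGo_eq l elem (s + 1)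
    have hmod : PySem.Int.mod (s : Int) 2 = ((s % 2 : Nat) : Int) := fmod_two_natCast s
    have hdd : (l.drop (s + 1)).drop 1 = l.drop (s + 2) := by
      rw [List.drop_drop]
    simp only [algunoGo, hget, hcast, ih, hmod]
    rcases Nat.even_or_odd s with he | ho
    · have h2 : s % 2 = 0 := Nat.even_iff.mp he
      have h2' : (s + 1) % 2 = 1 := by omega
      rw [hdrop, halla_cons, hdd]
      simp only [h2, h2']
      by_cases hv : l[s] = elem <;> simp [hv]
    · have h2 : s % 2 = 1 := Nat.odd_iff.mp ho
      have h2' : (s + 1) % 2 = 0 := by omega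
      simp only [h2, h2']
      by_cases hv : l[s] = elem <;> simp [hv]
termination_by l.length - s

theorem alguno_eq_halla (l : List Int) (elem : Int) :
    alguno_posicion_par l elem = halla elem l := by
  have h := algunoGo_eq l elem 0
  simpa [alguno_posicion_par] using h

theorem foldl_append_bools (m : List (List Int)) (elem : Int) (acc : List Bool) :
    m.foldl (fun acc fila =>
      if alguno_posicion_par fila elem then acc ++ [true] else acc ++ [false]) acc
      = acc ++ m.map (fun fila => halla elem fila) := by
  induction m generalizing acc with
  | nil => simp
  | cons fila rest ih =>
    simp only [List.foldl_cons, List.map_cons]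
    rw [alguno_eq_halla]
    by_cases h : halla elem fila = true <;> simp [h, ih]

-- ===== VERDICT (by name: the statement is the Claim_ definition above) =====
theorem elem_en_posiciones_pares_spec : Claim_equal_elem_en_posiciones_pares := by
  intro m elem _
  unfold Spec_elem_en_posiciones_pares elem_en_posiciones_pares elem_en_posiciones_pares_alt
  simpa using foldl_append_bools m elem []
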